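-- pv_equiv track=rewrite | github.com/Hzw-ZuttoZutto/Fuck-ZJU | src/simulator/mode_runner.py | _build_mode5_samples
-- ===== SOURCE A (Python) =====
-- def _build_mode5_samples(transcripts: list[str]) -> list[tuple[str, str]]:
--     samples: list[tuple[str, str]] = []
--     history: list[str] = []
--     for seq, current_text in enumerate(transcripts, start=1):
--         text = (current_text or "").strip()
--         if not text:
--             raise RuntimeError(f"mode5 transcript prepare produced empty transcript seq={seq}")
--         context = "\n".join(history[-18:]) if history else "无历史文本块"
--         samples.append((text, context))
--         history.append(f"[seq={seq}] {text}")
--     return samples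
-- ===== SOURCE B (Python) =====
-- def _build_mode5_samples(transcripts: list[str]) -> list[tuple[str, str]]:
--     texts: list[str] = []
--     for seq, current_text in enumerate(transcripts, start=1):
--         stripped = (current_text or "").strip()
--         if not stripped:
--             raise RuntimeError(f"mode5 transcript prepare produced empty transcript seq={seq}")
--         texts.append(stripped)
--     decorated = [f"[seq={i}] {t}" for i, t in enumerate(texts, start=1)]
--     return [
--         (t, "\n".join(decorated[max(0, i - 18):i]) if i else "无历史文本块")
--         for i, t in enumerate(texts)
--     ]
-- ===== Notes on version B (the rewrite author's own statement) =====
-- stated objective: alternative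
-- what changed: Replaces the single loop with a growing history buffer by two passes: precompute the stripped texts and the full decorated list once, then produce each context by index-based slicing decorated[max(0,i-18):i].
import Mathlib
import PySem

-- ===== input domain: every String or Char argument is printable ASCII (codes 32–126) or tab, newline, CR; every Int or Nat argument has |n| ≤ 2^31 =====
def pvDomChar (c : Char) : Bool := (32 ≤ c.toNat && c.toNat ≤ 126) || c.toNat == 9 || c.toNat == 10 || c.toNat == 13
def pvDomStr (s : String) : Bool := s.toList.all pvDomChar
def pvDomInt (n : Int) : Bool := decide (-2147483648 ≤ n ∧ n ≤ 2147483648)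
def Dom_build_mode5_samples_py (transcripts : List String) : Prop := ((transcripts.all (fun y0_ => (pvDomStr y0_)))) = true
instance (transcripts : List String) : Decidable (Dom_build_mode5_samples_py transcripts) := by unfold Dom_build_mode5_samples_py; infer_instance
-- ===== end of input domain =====

-- ===== PORT A =====
-- B restructures A as two passes over precomputed lists; same results. A raises on blank transcripts (excluded by Pre_).
def pvDec (s : Int) (t : String) : String :=
  PySem.Str.join "" ["[seq=", PySem.Int.toStr s, "] ", t]

-- loop body of A (context from history[-18:], append sample, append decorated line to history);
-- the 'raise' on an empty stripped text is excluded by Pre_ below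
def pvStepA (st : List (String × String) × List String) (p : Int × String) :
    List (String × String) × List String :=
  let text := PySem.Str.strip p.2
  let context := if st.2 ≠ [] then
      PySem.Str.join "\n" (PySem.List.slice st.2 (some (-18)) none)
    else "无历史文本块"
  (st.1 ++ [(text, context)], st.2 ++ [pvDec p.1 text])

def build_mode5_samples_py (transcripts : List String) : List (String × String) :=
  ((PySem.List.enumerate transcripts 1).foldl pvStepA ([], [])).1

-- ===== PORT B =====
-- context of B's i-th sample: "\n".join(decorated[max(0, i - 18):i]) if i else the sentinel
def pvCtxB (decorated : List String) (i : Int) : String :=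
  if i ≠ 0 then
    PySem.Str.join "\n" (PySem.List.slice decorated (some (max 0 (i - 18))) (some i))
  else "无历史文本块"

def build_mode5_samples_py_alt (transcripts : List String) : List (String × String) :=
  let texts := transcripts.map PySem.Str.strip
  let decorated := (PySem.List.enumerate texts 1).map (fun p => pvDec p.1 p.2)
  (PySem.List.enumerate texts 0).map (fun p => (p.2, pvCtxB decorated p.1))

-- ===== PRECONDITION & SPEC =====
-- Pre_ excludes exactly the inputs on which A raises RuntimeError: some transcript strips to empty.
def Pre_build_mode5_samples_py (transcripts : List String) : Prop :=
  ∀ t ∈ transcripts, PySem.Str.strip t ≠ ""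
instance (transcripts : List String) : Decidable (Pre_build_mode5_samples_py transcripts) := by
  unfold Pre_build_mode5_samples_py; infer_instance
def pvWitness_build_mode5_samples_py : List String := ["hello", " a b ", "x"]
def Spec_build_mode5_samples_py (transcripts : List String) (out : List (String × String)) : Prop := out = build_mode5_samples_py_alt transcripts
instance (transcripts : List String) (out : List (String × String)) : Decidable (Spec_build_mode5_samples_py transcripts out) := by unfold Spec_build_mode5_samples_py; infer_instance

-- ===== CLAIM (what is proved, stated in full; the proofs are below) =====
def Claim_equal_build_mode5_samples_py : Prop := ∀ (transcripts : List String), Dom_build_mode5_samples_py transcripts → Pre_build_mode5_samples_py transcripts → Spec_build_mode5_samples_py transcripts (build_mode5_samples_py transcripts)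

-- ===== LEMMAS AND PROOFS =====

theorem pv_enumerate_map {α β : Type} (f : α → β) :
    ∀ (xs : List α) (s : Int),
      PySem.List.enumerate (xs.map f) s
        = (PySem.List.enumerate xs s).map (fun p => (p.1, f p.2)) := by
  intro xs
  induction xs with
  | nil => intro s; simp [PySem.List.enumerate_nil]
  | cons x xs ih => intro s; simp [PySem.List.enumerate_cons, ih]

-- the contexts agree: A's history[-18:] over the first i decorated lines
-- equals B's decorated[max(0, i-18):i], for i ≤ |D|
theorem pv_ctx_eq (D : List String) (i : Nat) (hi : i ≤ D.length) :
    (if D.take i ≠ [] then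
        PySem.Str.join "\n" (PySem.List.slice (D.take i) (some (-18)) none)
      else "无历史文本块") = pvCtxB D (i : Int) := by
  unfold pvCtxB
  rcases Nat.eq_zero_or_pos i with h0 | h0
  · subst h0; simp
  · have hne : D.take i ≠ [] := by
      have hl : (D.take i).length = i := by rw [List.length_take]; omega
      intro h
      rw [h] at hl
      simp at hl
      omega
    have hiz : (i : Int) ≠ 0 := by exact_mod_cast Nat.pos_iff_ne_zero.mp h0
    rw [if_pos hne, if_pos hiz]
    have hslice : PySem.List.slice (D.take i) (some (-18)) none
        = (D.take i).drop ((D.take i).length - 18) := by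
      rw [PySem.List.slice_from_neg_ofNat (D.take i) 18 (by omega)]
    have hmax : (max 0 ((i : Int) - 18)) = ((i - 18 : Nat) : Int) := by omega
    have hslice2 : PySem.List.slice D (some (max 0 ((i : Int) - 18))) (some (i : Int))
        = (D.drop (i - 18)).take (i - (i - 18)) := by
      rw [hmax, PySem.List.slice_natCast]
    rw [hslice, hslice2, List.length_take, Nat.min_eq_left hi, List.drop_take]

-- main invariant: folding A's step over the suffix, with history = the first i decorated
-- lines, appends exactly B's samples from index i on
theorem pv_core (D : List String) :
    ∀ (ts : List String) (i : Nat) (acc : List (String × String)),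
      D.drop i = (PySem.List.enumerate ts ((i : Int) + 1)).map
          (fun p => pvDec p.1 (PySem.Str.strip p.2)) →
      ((PySem.List.enumerate ts ((i : Int) + 1)).foldl pvStepA (acc, D.take i)).1
        = acc ++ (PySem.List.enumerate (ts.map PySem.Str.strip) (i : Int)).map
            (fun p => (p.2, pvCtxB D p.1)) := by
  intro ts
  induction ts with
  | nil => intro i acc _; simp [PySem.List.enumerate_nil]
  | cons t ts ih =>
    intro i acc hD
    rw [PySem.List.enumerate_cons] at hD ⊢
    rw [List.map_cons] at hD
    have hlen : i < D.length := by
      by_contra h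
      rw [List.drop_eq_nil_of_le (by omega)] at hD
      exact List.cons_ne_nil _ _ hD.symm
    have hget : D[i]? = some (pvDec ((i : Int) + 1) (PySem.Str.strip t)) := by
      have h0 : (D.drop i)[0]? = some (pvDec ((i : Int) + 1) (PySem.Str.strip t)) := by
        rw [hD]; rfl
      rw [List.getElem?_drop] at h0
      simpa using h0
    have htake : D.take i ++ [pvDec ((i : Int) + 1) (PySem.Str.strip t)] = D.take (i + 1) := by
      rw [List.take_add_one, hget]
      rfl
    have hdrop : D.drop (i + 1) = (PySem.List.enumerate ts ((i : Int) + 1 + 1)).map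
        (fun p => pvDec p.1 (PySem.Str.strip p.2)) := by
      have : D.drop (i + 1) = (D.drop i).drop 1 := by
        rw [List.drop_drop]
      rw [this, hD]
      rfl
    rw [List.foldl_cons]
    have hstep : pvStepA (acc, D.take i) ((i : Int) + 1, t)
        = (acc ++ [(PySem.Str.strip t, pvCtxB D (i : Int))], D.take (i + 1)) := by
      unfold pvStepA
      simp only
      rw [pv_ctx_eq D i (le_of_lt hlen), htake]
    rw [hstep]
    have hcast : ((i : Int) + 1 + 1) = (((i + 1 : Nat) : Int) + 1) := by push_cast; ring
    have hcast2 : ((i : Int) + 1) = ((i + 1 : Nat) : Int) := by push_cast; ring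
    rw [hcast] at hdrop ⊢
    rw [ih (i + 1) _ hdrop]
    rw [List.map_cons, PySem.List.enumerate_cons, List.map_cons, hcast2]
    simp


-- ===== VERDICT (by name: the statement is the Claim_ definition above) =====
theorem build_mode5_samples_py_spec : Claim_equal_build_mode5_samples_py := by
  intro ts _ _
  unfold Spec_build_mode5_samples_py build_mode5_samples_py build_mode5_samples_py_alt
  simp only
  rw [pv_enumerate_map PySem.Str.strip ts 1, List.map_map]
  have h := pv_core ((PySem.List.enumerate ts 1).map (fun p => pvDec p.1 (PySem.Str.strip p.2)))
    ts 0 [] (by simp)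
  simp only [Nat.cast_zero, zero_add, List.take_zero, List.nil_append] at h
  rw [h, pv_enumerate_map PySem.Str.strip ts 0, List.map_map]
  simp [Function.comp_def]
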